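-- pv_equiv track=rewrite | github.com/m6r-ai/humbug | src/humbug/gui/tab/conversation/conversation_markdown_converter.py | _handle_line_breaks
-- ===== SOURCE A (Python) =====
-- def _handle_line_breaks(text: str) -> str:
--     """
--     Process text to convert lines ending with two spaces to line breaks.
--
--     Args:
--         text: The text to process
--
--     Returns:
--         Text with appropriate line breaks added
--     """
--     lines = text.split('\n')
--     processed_lines = []
--
--     for line in lines:
--         if line.endswith('  '):  # Line ends with exactly two spaces
--             processed_lines.append(line.rstrip() + '<br />')
--         else:
--             processed_lines.append(line)
--
--     return '\n'.join(processed_lines)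
-- ===== SOURCE B (Python) =====
-- def _handle_line_breaks(text: str) -> str:
--     # Single streaming pass: keep only the current run of trailing
--     # (non-newline) whitespace; flush it or replace it by '<br />' at each
--     # line end, depending on whether its last two characters are spaces.
--     out = []
--     pend = []  # pending run of trailing whitespace of the current line
--     for ch in text:
--         if ch == '\n':
--             if len(pend) >= 2 and pend[-1] == ' ' and pend[-2] == ' ':
--                 out.append('<br />')
--             else:
--                 out.extend(pend)
--             out.append('\n')
--             pend = []
--         elif ch.isspace():
--             pend.append(ch)
--         else:
--             out.extend(pend)
--             pend = []
--             out.append(ch)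
--     if len(pend) >= 2 and pend[-1] == ' ' and pend[-2] == ' ':
--         out.append('<br />')
--     else:
--         out.extend(pend)
--     return ''.join(out)
-- ===== Notes on version B (the rewrite author's own statement) =====
-- stated objective: alternative
-- what changed: Replaces the split-into-lines / per-line endswith+rstrip / join pipeline with a single streaming pass over the characters that maintains only the pending run of trailing intra-line whitespace and flushes it (or emits a break tag) at each line boundary.
import Mathlib
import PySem

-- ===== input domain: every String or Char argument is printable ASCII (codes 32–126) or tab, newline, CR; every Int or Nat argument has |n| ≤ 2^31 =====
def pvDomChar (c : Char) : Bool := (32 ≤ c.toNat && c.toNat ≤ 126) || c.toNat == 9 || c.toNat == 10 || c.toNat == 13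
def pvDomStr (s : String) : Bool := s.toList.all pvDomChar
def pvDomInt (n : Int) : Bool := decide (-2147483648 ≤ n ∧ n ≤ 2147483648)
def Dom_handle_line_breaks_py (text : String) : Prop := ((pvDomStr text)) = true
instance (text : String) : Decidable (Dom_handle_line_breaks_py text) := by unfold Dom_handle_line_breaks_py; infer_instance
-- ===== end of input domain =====

-- B replaces A's split/loop/join by one streaming pass over the characters that keeps only the
-- current run of trailing non-newline whitespace (objective: alternative single-pass algorithm).


-- ===== PORT A =====
-- per-line body of A's for-loop: endswith('  ') → rstrip() + '<br />'
def pvProcA (line : List Char) : List Char :=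
  if PySem.Chars.endswith line [' ', ' '] then PySem.Chars.rstrip line ++ "<br />".toList else line

def handle_line_breaks_py (text : String) : String :=
  String.mk (PySem.Chars.join ['\n'] ((PySem.Chars.splitOn text.toList ['\n']).map pvProcA))

-- ===== PORT B =====
-- len(pend) >= 2 and pend[-1] == ' ' and pend[-2] == ' '
def pvTwoSpaces (pend : List Char) : Bool :=
  decide (2 ≤ pend.length) && (PySem.List.pyGet? pend (-1) == some ' ')
    && (PySem.List.pyGet? pend (-2) == some ' ')

-- flushing the pending whitespace run at a line end
def pvFlush (pend : List Char) : List Char :=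
  if pvTwoSpaces pend then "<br />".toList else pend

-- body of B's for-loop; state = (out, pend)
def pvStep (st : List Char × List Char) (c : Char) : List Char × List Char :=
  if c = '\n' then (st.1 ++ pvFlush st.2 ++ ['\n'], [])
  else if PySem.Chars.isspace c then (st.1, st.2 ++ [c])
  else (st.1 ++ st.2 ++ [c], [])

def handle_line_breaks_py_alt (text : String) : String :=
  let st := text.toList.foldl pvStep ([], [])
  String.mk (st.1 ++ pvFlush st.2)

-- ===== PRECONDITION & SPEC =====
def Spec_handle_line_breaks_py (text : String) (out : String) : Prop := out = handle_line_breaks_py_alt text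
instance (text : String) (out : String) : Decidable (Spec_handle_line_breaks_py text out) := by unfold Spec_handle_line_breaks_py; infer_instance

-- ===== CLAIM (what is proved, stated in full; the proofs are below) =====
def Claim_equal_handle_line_breaks_py : Prop := ∀ (text : String), Dom_handle_line_breaks_py text → Spec_handle_line_breaks_py text (handle_line_breaks_py text)

-- ===== LEMMAS AND PROOFS =====

-- clean structural recursion computing split('\n')
def pvConsHead (p : List Char) : List (List Char) → List (List Char)
  | [] => [p]
  | x :: xs => (p ++ x) :: xs

def pvSplit : List Char → List (List Char)
  | [] => [[]]
  | c :: cs => if c = '\n' then [] :: pvSplit cs else pvConsHead [c] (pvSplit cs)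

lemma pvSplit_ne_nil (cs : List Char) : pvSplit cs ≠ [] := by
  cases cs with
  | nil => simp [pvSplit]
  | cons c cs =>
    simp only [pvSplit]
    split
    · simp
    · cases h : pvSplit cs <;> simp [pvConsHead]

lemma pvConsHead_consHead (p q : List Char) (xs : List (List Char)) :
    pvConsHead p (pvConsHead q xs) = pvConsHead (p ++ q) xs := by
  cases xs <;> simp [pvConsHead]

lemma pvGo_nil (fuel : Nat) (cur : List Char) (acc : List (List Char)) :
    PySem.Chars.splitOn.go ['\n'] (fuel + 1) [] cur acc = (cur.reverse :: acc).reverse := by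
  rw [PySem.Chars.splitOn.go.eq_def]

lemma pvGo_cons (fuel : Nat) (c : Char) (rest cur : List Char) (acc : List (List Char)) :
    PySem.Chars.splitOn.go ['\n'] (fuel + 1) (c :: rest) cur acc
      = if (['\n'].isPrefixOf (c :: rest)) then
          PySem.Chars.splitOn.go ['\n'] fuel rest [] (cur.reverse :: acc)
        else PySem.Chars.splitOn.go ['\n'] fuel rest (c :: cur) acc := by
  rw [PySem.Chars.splitOn.go.eq_def]; rfl

lemma pvConsHead_nil (xs : List (List Char)) (h : xs ≠ []) : pvConsHead [] xs = xs := by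
  cases xs with
  | nil => exact absurd rfl h
  | cons x xs => simp [pvConsHead]

lemma pvSplit_go (l : List Char) : ∀ (fuel : Nat) (cur : List Char) (acc : List (List Char)),
    l.length ≤ fuel →
    PySem.Chars.splitOn.go ['\n'] (fuel + 1) l cur acc
      = acc.reverse ++ pvConsHead cur.reverse (pvSplit l) := by
  induction l with
  | nil => intro fuel cur acc _; simp [pvGo_nil, pvSplit, pvConsHead]
  | cons c rest ih =>
    intro fuel cur acc h
    obtain ⟨g, rfl⟩ : ∃ g, fuel = g + 1 := ⟨fuel - 1, by simp at h; omega⟩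
    have hg : rest.length ≤ g := by simp at h; omega
    rw [pvGo_cons]
    by_cases hc : c = '\n'
    · subst hc
      simp only [List.isPrefixOf, BEq.rfl, Bool.true_and, if_pos]
      rw [ih g [] _ hg]
      simp only [List.reverse_nil]
      rw [pvConsHead_nil _ (pvSplit_ne_nil rest)]
      simp [pvSplit, pvConsHead]
    · have : (['\n'].isPrefixOf (c :: rest)) = false := by
        simp [List.isPrefixOf]
        exact fun h => hc h.symm
      rw [this]
      simp only [Bool.false_eq_true, if_false]
      rw [ih g _ _ hg]
      cases hsp : pvSplit rest <;> simp [pvSplit, hc, hsp, pvConsHead]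

lemma pvSplitOn_eq (cs : List Char) : PySem.Chars.splitOn cs ['\n'] = pvSplit cs := by
  unfold PySem.Chars.splitOn
  rw [pvSplit_go cs cs.length [] [] le_rfl]
  simp only [List.reverse_nil]
  rw [pvConsHead_nil _ (pvSplit_ne_nil cs)]
  simp

-- B's two-space test is exactly A's endswith('  ')
lemma pvTwoSpaces_eq_endswith (l : List Char) :
    pvTwoSpaces l = PySem.Chars.endswith l [' ', ' '] := by
  rw [← List.reverse_reverse l]
  generalize l.reverse = r
  rcases r with _ | ⟨a, _ | ⟨b, t⟩⟩
  · decide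
  · simp [pvTwoSpaces, PySem.Chars.endswith, List.isSuffixOf, List.isPrefixOf]
  · simp [pvTwoSpaces, PySem.List.pyGet?, PySem.List.pyIdx?, PySem.Chars.endswith,
      List.isSuffixOf, List.isPrefixOf]
    rw [Bool.beq_comm (a := a), Bool.beq_comm (a := b)]

-- on an all-whitespace line, flushing the run is exactly A's per-line transform
lemma pvFlush_eq_procA (p : List Char) (hp : ∀ x ∈ p, PySem.Chars.isspace x = true) :
    pvFlush p = pvProcA p := by
  unfold pvFlush pvProcA
  rw [pvTwoSpaces_eq_endswith]
  have hr : PySem.Chars.rstrip p = [] := by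
    unfold PySem.Chars.rstrip
    rw [List.dropWhile_eq_nil_iff.mpr (by intro x hx; exact hp x (List.mem_reverse.mp hx))]
    rfl
  split
  · rw [hr]; rfl
  · rfl

-- prepending a non-'\n' prefix merges it into the first line
lemma pvSplit_append (p : List Char) (cs : List Char) (hp : ∀ x ∈ p, x ≠ '\n') :
    pvSplit (p ++ cs) = pvConsHead p (pvSplit cs) := by
  induction p with
  | nil => simp [pvConsHead_nil _ (pvSplit_ne_nil cs)]
  | cons a p ih =>
    have ha : a ≠ '\n' := hp a (by simp)
    simp only [List.cons_append, pvSplit, if_neg ha]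
    rw [ih (fun x hx => hp x (by simp [hx])), pvConsHead_consHead]
    rfl

-- prepending a prefix ending in a non-whitespace char commutes with A's transform
lemma pvDropWhile_append (q : Char → Bool) (u : List Char) (c : Char) (v : List Char)
    (hc : q c = false) :
    List.dropWhile q (u ++ c :: v) = List.dropWhile q u ++ c :: v := by
  induction u with
  | nil => simp [List.dropWhile, hc]
  | cons a u ih =>
    by_cases ha : q a <;> simp [List.dropWhile, ha, ih]

lemma pvSpace_isspace : PySem.Chars.isspace ' ' = true := by decide

lemma pvRstrip_append (p : List Char) (c : Char) (l : List Char)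
    (hc : PySem.Chars.isspace c = false) :
    PySem.Chars.rstrip (p ++ c :: l) = p ++ c :: PySem.Chars.rstrip l := by
  unfold PySem.Chars.rstrip
  rw [show (p ++ c :: l).reverse = l.reverse ++ c :: p.reverse by simp,
    pvDropWhile_append _ _ _ _ hc]
  simp

lemma pvEndswith_append (p : List Char) (c : Char) (l : List Char)
    (hc : PySem.Chars.isspace c = false) :
    PySem.Chars.endswith (p ++ c :: l) [' ', ' '] = PySem.Chars.endswith l [' ', ' '] := by
  have hcs : (' ' == c) = false := by
    cases h : (' ' == c)
    · rfl
    · exact absurd (beq_iff_eq.mp h ▸ pvSpace_isspace) (by simp [hc])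
  unfold PySem.Chars.endswith
  unfold List.isSuffixOf
  rw [show (p ++ c :: l).reverse = l.reverse ++ c :: p.reverse by simp]
  rcases l.reverse with _ | ⟨a, _ | ⟨b, t⟩⟩ <;>
    simp [List.isPrefixOf, hcs]

lemma pvProcA_append (p : List Char) (c : Char) (l : List Char)
    (hc : PySem.Chars.isspace c = false) :
    pvProcA (p ++ c :: l) = p ++ c :: pvProcA l := by
  unfold pvProcA
  rw [pvEndswith_append _ _ _ hc]
  split
  · rw [pvRstrip_append _ _ _ hc]; simp
  · rfl

-- the out-component of B's fold only accumulates on the left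
lemma pvFold_out (cs : List Char) : ∀ (out pend : List Char),
    cs.foldl pvStep (out, pend)
      = (out ++ (cs.foldl pvStep ([], pend)).1, (cs.foldl pvStep ([], pend)).2) := by
  induction cs with
  | nil => intro out pend; simp
  | cons c cs ih =>
    intro out pend
    have hstep : ∀ (o p : List Char),
        pvStep (o, p) c = (o ++ (pvStep (([] : List Char), p) c).1, (pvStep (([] : List Char), p) c).2) := by
      intro o p; unfold pvStep; split_ifs <;> simp
    simp only [List.foldl_cons]
    rcases hst : pvStep (([] : List Char), pend) c with ⟨o1, p1⟩
    rw [hstep out, hstep [], hst]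
    simp only [List.nil_append]
    rw [ih (out ++ o1) p1, ih o1 p1]
    simp

def pvJoinA (cs : List Char) : List Char :=
  PySem.Chars.join ['\n'] ((pvSplit cs).map pvProcA)

lemma pvJoin_cons₂ (x y : List Char) (ys : List (List Char)) :
    PySem.Chars.join ['\n'] (x :: y :: ys) = x ++ '\n' :: PySem.Chars.join ['\n'] (y :: ys) := by
  simp [PySem.Chars.join, List.intercalate]

lemma pvJoin_head_append (a x : List Char) (xs : List (List Char)) :
    PySem.Chars.join ['\n'] ((a ++ x) :: xs) = a ++ PySem.Chars.join ['\n'] (x :: xs) := by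
  cases xs <;> simp [PySem.Chars.join, List.intercalate]

lemma pvJoinA_single (p : List Char) (hp : ∀ x ∈ p, x ≠ '\n') :
    pvJoinA p = pvProcA p := by
  have h1 : pvSplit p = [p] := by
    have h := pvSplit_append p [] hp
    simp only [List.append_nil] at h
    rw [h]
    simp [pvSplit, pvConsHead]
  unfold pvJoinA
  rw [h1]
  simp [PySem.Chars.join, List.intercalate]

lemma pvMain (cs : List Char) : ∀ (pend : List Char),
    (∀ x ∈ pend, PySem.Chars.isspace x = true ∧ x ≠ '\n') →
    ((cs.foldl pvStep ([], pend)).1 ++ pvFlush (cs.foldl pvStep ([], pend)).2)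
      = pvJoinA (pend ++ cs) := by
  induction cs with
  | nil =>
    intro pend hp
    simp only [List.foldl_nil, List.append_nil]
    rw [pvJoinA_single pend (fun x hx => (hp x hx).2),
      ← pvFlush_eq_procA pend (fun x hx => (hp x hx).1)]
    simp
  | cons c cs ih =>
    intro pend hp
    simp only [List.foldl_cons]
    by_cases hc : c = '\n'
    · subst hc
      have hst : pvStep (([] : List Char), pend) '\n' = (pvFlush pend ++ ['\n'], []) := by
        unfold pvStep; simp
      rw [hst, pvFold_out cs]
      have hIH := ih [] (by simp)
      have hsplit : pvSplit (pend ++ '\n' :: cs) = pend :: pvSplit cs := by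
        rw [pvSplit_append pend _ (fun x hx => (hp x hx).2)]
        simp [pvSplit, pvConsHead]
      unfold pvJoinA
      rw [hsplit]
      rcases hsp : pvSplit cs with _ | ⟨l, ls⟩
      · exact absurd hsp (pvSplit_ne_nil cs)
      · simp only [List.map_cons]
        rw [pvJoin_cons₂,
          ← pvFlush_eq_procA pend (fun x hx => (hp x hx).1)]
        have hjcs : pvJoinA cs = PySem.Chars.join ['\n'] (pvProcA l :: List.map pvProcA ls) := by
          unfold pvJoinA; rw [hsp]; rfl
        rw [← hjcs]
        simp only [List.nil_append] at hIH
        simp only [List.append_assoc]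
        rw [hIH]
        simp
    · by_cases hs : PySem.Chars.isspace c
      · have hst : pvStep (([] : List Char), pend) c = ([], pend ++ [c]) := by
          unfold pvStep; simp [hc, hs]
        rw [hst, ih (pend ++ [c]) ?_]
        · simp
        · intro x hx
          rcases List.mem_append.mp hx with h | h
          · exact hp x h
          · simp at h; subst h; exact ⟨hs, hc⟩
      · have hst : pvStep (([] : List Char), pend) c = (pend ++ [c], []) := by
          unfold pvStep; simp [hc, hs]
        rw [hst, pvFold_out cs]
        have hIH := ih [] (by simp)
        unfold pvJoinA
        rw [pvSplit_append pend _ (fun x hx => (hp x hx).2)]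
        rcases hsp : pvSplit cs with _ | ⟨l, ls⟩
        · exact absurd hsp (pvSplit_ne_nil cs)
        · simp only [pvSplit, if_neg hc, hsp, pvConsHead, List.map_cons]
          simp only [List.nil_append] at hIH
          rw [show pend ++ ([c] ++ l) = pend ++ c :: l from by simp,
            pvProcA_append pend c l (by simpa using hs),
            show pend ++ c :: pvProcA l = (pend ++ [c]) ++ pvProcA l from by simp,
            pvJoin_head_append]
          have hjcs : pvJoinA cs = PySem.Chars.join ['\n'] (pvProcA l :: List.map pvProcA ls) := by
            unfold pvJoinA; rw [hsp]; rfl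
          rw [← hjcs]
          simp only [List.append_assoc]
          rw [hIH]

-- ===== VERDICT (by name: the statement is the Claim_ definition above) =====
theorem handle_line_breaks_py_spec : Claim_equal_handle_line_breaks_py := by
  intro text _
  unfold Spec_handle_line_breaks_py handle_line_breaks_py handle_line_breaks_py_alt
  have h := pvMain text.toList [] (by simp)
  simp only [List.nil_append] at h
  rw [pvSplitOn_eq, ← pvJoinA]
  exact congrArg String.mk h.symm
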